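-- pv_equiv track=rewrite | github.com/ReddiMadhu/tetststs | agents/cat/construction_rules.py | _identify_primary_frame
-- ===== SOURCE A (Python) =====
-- from typing import Dict, List, Optional, Tuple
--
-- def _identify_primary_frame(
--     text: str, frame_tokens: List[str]
-- ) -> Optional[str]:
--     """
--     From a list of detected frame tokens, identify the primary (structural) one.
--     Priority: concrete frame > steel frame > heavy timber > metal building > wood frame.
--     """
--     priority_order = [
--         "concrete frame", "rc frame", "reinforced concrete frame",
--         "steel moment frame", "steel braced frame", "steel frame",
--         "heavy timber",
--         "pre-engineered metal building", "metal building",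
--         "wood frame", "light wood frame",
--         "tilt-up", "tilt up",
--     ]
--     for candidate in priority_order:
--         if candidate in frame_tokens:
--             return candidate
--     return frame_tokens[0] if frame_tokens else None
-- ===== SOURCE B (Python) =====
-- from typing import Dict, List, Optional, Tuple
--
-- def _identify_primary_frame(
--     text: str, frame_tokens: List[str]
-- ) -> Optional[str]:
--     """Single pass over frame_tokens, ranking each token by a precomputed
--     priority index (unknown tokens get a sentinel rank past the end); the
--     first token with the lowest rank wins, None for an empty list."""
--     priority_order = [
--         "concrete frame", "rc frame", "reinforced concrete frame",
--         "steel moment frame", "steel braced frame", "steel frame",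
--         "heavy timber",
--         "pre-engineered metal building", "metal building",
--         "wood frame", "light wood frame",
--         "tilt-up", "tilt up",
--     ]
--     rank = {s: i for i, s in enumerate(priority_order)}
--     sentinel = len(priority_order)
--     best = None  # (token, rank), strictly-less update keeps the first minimum
--     for t in frame_tokens:
--         r = rank.get(t, sentinel)
--         if best is None or r < best[1]:
--             best = (t, r)
--     return best[0] if best is not None else None
-- ===== Notes on version B (the rewrite author's own statement) =====
-- stated objective: alternative
-- what changed: A scans the fixed priority list and does a membership test of frame_tokens per candidate (up to 13 passes over the list); B precomputes a rank dictionary over the priority list and makes a single pass over frame_tokens keeping the first token of minimal rank (sentinel rank for unknown tokens), which also yields frame_tokens[0] when nothing matches and None on an empty list.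
import Mathlib
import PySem

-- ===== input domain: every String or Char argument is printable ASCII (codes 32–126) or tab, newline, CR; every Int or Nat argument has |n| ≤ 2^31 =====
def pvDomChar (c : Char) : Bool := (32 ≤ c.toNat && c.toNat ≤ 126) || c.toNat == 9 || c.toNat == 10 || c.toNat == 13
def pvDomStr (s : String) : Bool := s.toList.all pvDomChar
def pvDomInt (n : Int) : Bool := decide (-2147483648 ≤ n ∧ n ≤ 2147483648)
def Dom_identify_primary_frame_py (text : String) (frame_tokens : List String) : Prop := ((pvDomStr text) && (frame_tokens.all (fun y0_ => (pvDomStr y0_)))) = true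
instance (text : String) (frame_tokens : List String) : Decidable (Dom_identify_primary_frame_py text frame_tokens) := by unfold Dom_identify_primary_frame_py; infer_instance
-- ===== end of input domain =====

-- B replaces A's scan over the priority list (one membership test of frame_tokens per
-- candidate) by a single pass over frame_tokens using a precomputed rank dictionary
-- (objective: alternative, same return value).

def pvPriorityOrder : List String :=
  ["concrete frame","rc frame","reinforced concrete frame","steel moment frame","steel braced frame","steel frame","heavy timber","pre-engineered metal building","metal building","wood frame","light wood frame","tilt-up","tilt up"]

-- ===== PORT A =====
-- A's loop: for candidate in priority_order: if candidate in frame_tokens: return candidate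
def pvALoop (frame_tokens : List String) : List String → Option String
  | [] => none
  | c :: rest => if frame_tokens.contains c then some c else pvALoop frame_tokens rest

def identify_primary_frame_py (text : String) (frame_tokens : List String) : Option String :=
  match pvALoop frame_tokens pvPriorityOrder with
  | some c => some c
  | none =>
    -- return frame_tokens[0] if frame_tokens else None
    match frame_tokens with
    | [] => none
    | t :: _ => some t

-- ===== PORT B =====
-- rank = {s: i for i, s in enumerate(priority_order)}
def pvRankDict : PySem.Dict String Int :=
  (PySem.List.enumerate pvPriorityOrder).foldl (fun d p => d.insert p.2 p.1) PySem.Dict.empty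

-- loop body: r = rank.get(t, sentinel); if best is None or r < best[1]: best = (t, r)
def pvBStep (acc : Option (String × Int)) (t : String) : Option (String × Int) :=
  let r := pvRankDict.getD t (pvPriorityOrder.length : Int)
  match acc with
  | none => some (t, r)
  | some (b, br) => if r < br then some (t, r) else some (b, br)

def identify_primary_frame_py_alt (text : String) (frame_tokens : List String) : Option String :=
  match frame_tokens.foldl pvBStep none with
  | some (c, _) => some c
  | none => none

-- ===== PRECONDITION & SPEC =====
def Spec_identify_primary_frame_py (text : String) (frame_tokens : List String) (out : Option String) : Prop := out = identify_primary_frame_py_alt text frame_tokens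
instance (text : String) (frame_tokens : List String) (out : Option String) : Decidable (Spec_identify_primary_frame_py text frame_tokens out) := by unfold Spec_identify_primary_frame_py; infer_instance

-- ===== CLAIM (what is proved, stated in full; the proofs are below) =====
def Claim_equal_identify_primary_frame_py : Prop := ∀ (text : String) (frame_tokens : List String), Dom_identify_primary_frame_py text frame_tokens → Spec_identify_primary_frame_py text frame_tokens (identify_primary_frame_py text frame_tokens)

-- ===== LEMMAS AND PROOFS =====

-- index of t in l (l.length if absent): the proof-side mirror of the rank dictionary
def pvIdx : List String → String → Int
  | [], _ => 0
  | c :: rest, t => if c = t then 0 else 1 + pvIdx rest t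

def pvRank (t : String) : Int := pvRankDict.getD t (pvPriorityOrder.length : Int)

-- the rank dictionary realises pvIdx on the priority list
theorem pvRank_eq (t : String) : pvRank t = pvIdx pvPriorityOrder t := by
  have hd : pvRankDict = PySem.Dict.ofList [("concrete frame",0),("rc frame",1),("reinforced concrete frame",2),("steel moment frame",3),("steel braced frame",4),("steel frame",5),("heavy timber",6),("pre-engineered metal building",7),("metal building",8),("wood frame",9),("light wood frame",10),("tilt-up",11),("tilt up",12)] := by decide
  have hg : pvRank t = (List.find? (fun p => p.1 == t) [("concrete frame",(0:Int)),("rc frame",1),("reinforced concrete frame",2),("steel moment frame",3),("steel braced frame",4),("steel frame",5),("heavy timber",6),("pre-engineered metal building",7),("metal building",8),("wood frame",9),("light wood frame",10),("tilt-up",11),("tilt up",12)]).elim 13 (·.2) := by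
    rw [pvRank, hd]
    show (Option.map (fun x => x.2) (List.find? (fun p => p.1 == t)
      (PySem.Dict.ofList [("concrete frame",0),("rc frame",1),("reinforced concrete frame",2),("steel moment frame",3),("steel braced frame",4),("steel frame",5),("heavy timber",6),("pre-engineered metal building",7),("metal building",8),("wood frame",9),("light wood frame",10),("tilt-up",11),("tilt up",12)] : PySem.Dict String Int).items)).getD (pvPriorityOrder.length : Int) = _
    rw [show (PySem.Dict.ofList [("concrete frame",0),("rc frame",1),("reinforced concrete frame",2),("steel moment frame",3),("steel braced frame",4),("steel frame",5),("heavy timber",6),("pre-engineered metal building",7),("metal building",8),("wood frame",9),("light wood frame",10),("tilt-up",11),("tilt up",12)] : PySem.Dict String Int).items = [("concrete frame",(0:Int)),("rc frame",1),("reinforced concrete frame",2),("steel moment frame",3),("steel braced frame",4),("steel frame",5),("heavy timber",6),("pre-engineered metal building",7),("metal building",8),("wood frame",9),("light wood frame",10),("tilt-up",11),("tilt up",12)] from by decide]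
    cases h : List.find? (fun p => p.1 == t) [("concrete frame",(0:Int)),("rc frame",1),("reinforced concrete frame",2),("steel moment frame",3),("steel braced frame",4),("steel frame",5),("heavy timber",6),("pre-engineered metal building",7),("metal building",8),("wood frame",9),("light wood frame",10),("tilt-up",11),("tilt up",12)] <;> simp [h, pvPriorityOrder]
  rw [hg]
  by_cases h0 : "concrete frame" = t
  · subst h0; decide
  by_cases h1 : "rc frame" = t
  · subst h1; decide
  by_cases h2 : "reinforced concrete frame" = t
  · subst h2; decide
  by_cases h3 : "steel moment frame" = t
  · subst h3; decide
  by_cases h4 : "steel braced frame" = t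
  · subst h4; decide
  by_cases h5 : "steel frame" = t
  · subst h5; decide
  by_cases h6 : "heavy timber" = t
  · subst h6; decide
  by_cases h7 : "pre-engineered metal building" = t
  · subst h7; decide
  by_cases h8 : "metal building" = t
  · subst h8; decide
  by_cases h9 : "wood frame" = t
  · subst h9; decide
  by_cases h10 : "light wood frame" = t
  · subst h10; decide
  by_cases h11 : "tilt-up" = t
  · subst h11; decide
  by_cases h12 : "tilt up" = t
  · subst h12; decide
  ·
    have e0 : ("concrete frame" == t) = false := by simp [h0]
    have e1 : ("rc frame" == t) = false := by simp [h1]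
    have e2 : ("reinforced concrete frame" == t) = false := by simp [h2]
    have e3 : ("steel moment frame" == t) = false := by simp [h3]
    have e4 : ("steel braced frame" == t) = false := by simp [h4]
    have e5 : ("steel frame" == t) = false := by simp [h5]
    have e6 : ("heavy timber" == t) = false := by simp [h6]
    have e7 : ("pre-engineered metal building" == t) = false := by simp [h7]
    have e8 : ("metal building" == t) = false := by simp [h8]
    have e9 : ("wood frame" == t) = false := by simp [h9]
    have e10 : ("light wood frame" == t) = false := by simp [h10]
    have e11 : ("tilt-up" == t) = false := by simp [h11]
    have e12 : ("tilt up" == t) = false := by simp [h12]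
    simp [List.find?, pvIdx, pvPriorityOrder, e0, e1, e2, e3, e4, e5, e6, e7, e8, e9, e10, e11, e12, h0, h1, h2, h3, h4, h5, h6, h7, h8, h9, h10, h11, h12]

theorem pvIdx_nonneg (l : List String) (t : String) : 0 ≤ pvIdx l t := by
  induction l with
  | nil => simp [pvIdx]
  | cons c rest ih => simp only [pvIdx]; split <;> omega

theorem pvIdx_le (l : List String) (t : String) : pvIdx l t ≤ (l.length : Int) := by
  induction l with
  | nil => simp [pvIdx]
  | cons c rest ih => simp only [pvIdx, List.length_cons]; split <;> push_cast <;> omega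

theorem pvIdx_lt_mem (l : List String) (t : String) (h : pvIdx l t < (l.length : Int)) :
    t ∈ l := by
  induction l with
  | nil => simp [pvIdx] at h
  | cons c rest ih =>
    simp only [pvIdx, List.length_cons] at h
    by_cases hc : c = t
    · simp [hc]
    · simp only [if_neg hc] at h
      have : pvIdx rest t < (rest.length : Int) := by push_cast at h ⊢; omega
      exact List.mem_cons_of_mem _ (ih this)

theorem pvIdx_inj (l : List String) (s t : String) :
    pvIdx l s < (l.length : Int) → pvIdx l s = pvIdx l t → s = t := by
  induction l with
  | nil => intro hs _; simp [pvIdx] at hs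
  | cons c rest ih =>
    intro hs h
    by_cases hcs : c = s <;> by_cases hct : c = t
    · rw [← hcs, hct]
    · exfalso
      have h1 := pvIdx_nonneg rest t
      simp only [pvIdx, if_pos hcs, if_neg hct] at h
      omega
    · exfalso
      have h1 := pvIdx_nonneg rest s
      simp only [pvIdx, if_neg hcs, if_pos hct] at h
      omega
    · have h1 : pvIdx rest s < (rest.length : Int) := by
        simp only [pvIdx, if_neg hcs, List.length_cons] at hs
        push_cast at hs ⊢; omega
      have h2 : pvIdx rest s = pvIdx rest t := by
        simp only [pvIdx, if_neg hcs, if_neg hct] at h; omega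
      exact ih h1 h2

-- A's loop returns the first candidate occurring in frame_tokens: its index is
-- below the length and minimal among all members of frame_tokens.
theorem pvALoop_some (tok : List String) (l : List String) (c : String)
    (h : pvALoop tok l = some c) :
    c ∈ tok ∧ pvIdx l c < (l.length : Int) ∧ ∀ t ∈ tok, pvIdx l c ≤ pvIdx l t := by
  induction l with
  | nil => simp [pvALoop] at h
  | cons p rest ih =>
    by_cases hp : tok.contains p
    · simp only [pvALoop, if_pos hp, Option.some.injEq] at h
      refine ⟨?_, ?_, ?_⟩
      · rw [← h]; simpa using hp
      · rw [← h]
        simp only [pvIdx, List.length_cons]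
        simp only [if_true]
        push_cast; omega
      · intro t _
        rw [← h]
        simp only [pvIdx]
        simp only [if_true]
        have := pvIdx_nonneg rest t
        split <;> omega
    · simp only [pvALoop, if_neg hp] at h
      obtain ⟨hc, hlt, hmin⟩ := ih h
      have hcne : p ≠ c := by
        intro e; exact hp (by simpa [e] using hc)
      refine ⟨hc, ?_, ?_⟩
      · simp only [pvIdx, if_neg hcne, List.length_cons]; push_cast; omega
      · intro t ht
        have htne : p ≠ t := by
          intro e; exact hp (by simpa [e] using ht)
        simp only [pvIdx, if_neg hcne, if_neg htne]
        have := hmin t ht; omega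

theorem pvALoop_none (tok : List String) (l : List String)
    (h : pvALoop tok l = none) : ∀ c ∈ l, c ∉ tok := by
  induction l with
  | nil => simp
  | cons p rest ih =>
    by_cases hp : tok.contains p
    · have hp' : p ∈ tok := by simpa using hp
      simp [pvALoop, hp'] at h
    · simp only [pvALoop, if_neg hp] at h
      intro c hc
      rcases List.mem_cons.mp hc with rfl | hc'
      · simpa using hp
      · exact ih h c hc'

-- B's fold invariant: starting from a consistent pair, the result is a consistent
-- pair whose rank is minimal over the start and all scanned tokens.
theorem pvBfold_inv (l : List String) (b : String) :
    ∃ c, l.foldl pvBStep (some (b, pvRank b)) = some (c, pvRank c) ∧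
      (c = b ∨ c ∈ l) ∧ pvRank c ≤ pvRank b ∧ ∀ t ∈ l, pvRank c ≤ pvRank t := by
  induction l generalizing b with
  | nil => exact ⟨b, rfl, Or.inl rfl, le_refl _, by simp⟩
  | cons t rest ih =>
    have hstep : pvBStep (some (b, pvRank b)) t
        = if pvRank t < pvRank b then some (t, pvRank t) else some (b, pvRank b) := rfl
    by_cases hlt : pvRank t < pvRank b
    · obtain ⟨c, hfold, hmem, hle, hmin⟩ := ih t
      refine ⟨c, ?_, ?_, by omega, ?_⟩
      · rw [List.foldl_cons, hstep, if_pos hlt]; exact hfold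
      · rcases hmem with rfl | h <;> simp_all
      · intro u hu
        rcases List.mem_cons.mp hu with rfl | hu'
        · omega
        · exact hmin u hu'
    · obtain ⟨c, hfold, hmem, hle, hmin⟩ := ih b
      refine ⟨c, ?_, ?_, hle, ?_⟩
      · rw [List.foldl_cons, hstep, if_neg hlt]; exact hfold
      · rcases hmem with rfl | h <;> simp_all
      · intro u hu
        rcases List.mem_cons.mp hu with rfl | hu'
        · omega
        · exact hmin u hu'

-- ===== VERDICT (by name: the statement is the Claim_ definition above) =====
theorem identify_primary_frame_py_spec : Claim_equal_identify_primary_frame_py := by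
  intro text frame_tokens _
  unfold Spec_identify_primary_frame_py
  unfold identify_primary_frame_py identify_primary_frame_py_alt
  cases hft : frame_tokens with
  | nil =>
    cases hA : pvALoop [] pvPriorityOrder with
    | none => simp
    | some c =>
      have := (pvALoop_some [] pvPriorityOrder c hA).1
      simp at this
  | cons t0 rest =>
    have hfold0 : (t0 :: rest).foldl pvBStep none
        = rest.foldl pvBStep (some (t0, pvRank t0)) := by
      rw [List.foldl_cons]; rfl
    obtain ⟨c', hfold, hmem', hle', hmin'⟩ := pvBfold_inv rest t0
    have hc'mem : c' ∈ t0 :: rest := by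
      rcases hmem' with rfl | h
      · exact List.mem_cons_self
      · exact List.mem_cons_of_mem _ h
    have hminAll : ∀ u ∈ t0 :: rest, pvRank c' ≤ pvRank u := by
      intro u hu
      rcases List.mem_cons.mp hu with rfl | hu'
      · exact hle'
      · exact hmin' u hu'
    cases hA : pvALoop (t0 :: rest) pvPriorityOrder with
    | some c =>
      obtain ⟨hcmem, hclt, hcmin⟩ := pvALoop_some _ _ _ hA
      have h1 : pvRank c' ≤ pvRank c := hminAll c hcmem
      have h2 : pvIdx pvPriorityOrder c ≤ pvIdx pvPriorityOrder c' := hcmin c' hc'mem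
      have heq : pvIdx pvPriorityOrder c = pvIdx pvPriorityOrder c' := by
        rw [pvRank_eq, pvRank_eq] at h1; omega
      have : c = c' := pvIdx_inj _ _ _ hclt heq
      subst this
      simp [hfold0, hfold]
    | none =>
      -- no priority token occurs: every token has the sentinel rank, the fold keeps t0
      have hall : ∀ u ∈ t0 :: rest, pvRank u = (pvPriorityOrder.length : Int) := by
        intro u hu
        have hle := pvIdx_le pvPriorityOrder u
        rcases lt_or_eq_of_le hle with hlt | he
        · exact absurd hu (pvALoop_none _ _ hA u (pvIdx_lt_mem _ _ hlt))
        · rw [pvRank_eq]; exact he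
      have hnoch : rest.foldl pvBStep (some (t0, pvRank t0)) = some (t0, pvRank t0) := by
        have key : ∀ (l : List String), (∀ u ∈ l, ¬ pvRank u < pvRank t0) →
            l.foldl pvBStep (some (t0, pvRank t0)) = some (t0, pvRank t0) := by
          intro l
          induction l with
          | nil => intro _; rfl
          | cons u us ih =>
            intro h
            have hu := h u List.mem_cons_self
            have hstep : pvBStep (some (t0, pvRank t0)) u
                = if pvRank u < pvRank t0 then some (u, pvRank u) else some (t0, pvRank t0) := rfl
            rw [List.foldl_cons, hstep, if_neg hu]
            exact ih (fun v hv => h v (List.mem_cons_of_mem _ hv))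
        exact key rest (fun u hu => by
          rw [hall u (List.mem_cons_of_mem _ hu), hall t0 List.mem_cons_self]; omega)
      simp [hfold0, hnoch]
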